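-- pv_equiv track=rewrite | github.com/DiamondLightSource/Opt-ID | IDSort/src/v2/id_setup.py | create_direction_list_antisymetric_ppm_top
-- ===== SOURCE A (Python) =====
-- def create_direction_list_antisymetric_ppm_top(nperiods):
--     direction = []
--     for i in range(0, (4 * nperiods + 5) - 1, 4):
--         direction.append((-1, 1, -1))
--         direction.append((1, 1, 1))
--         direction.append((1, 1, 1))
--         direction.append((-1, -1, 1))
--
--     # Append last element
--     direction.append((-1, 1, -1))
--     return direction
-- ===== SOURCE B (Python) =====
-- def create_direction_list_antisymetric_ppm_top(nperiods):
--     # Generate each element directly from its index: position i in the result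
--     # is determined solely by i mod 4 (the final trailing element is just the
--     # next index in the same periodic pattern, since it is congruent to 0 mod 4).
--     pattern = [(-1, 1, -1), (1, 1, 1), (1, 1, 1), (-1, -1, 1)]
--     count = 4 * max(nperiods + 1, 0) + 1
--     return [pattern[i % 4] for i in range(count)]
-- ===== Notes on version B (the rewrite author's own statement) =====
-- stated objective: alternative
-- what changed: Instead of appending four tuples per loop iteration plus a trailing append, B computes the total element count up front and generates each element directly from its index via a lookup keyed on the index modulo the pattern length, the trailing element being just the next index of the same periodic pattern.
import Mathlib
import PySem

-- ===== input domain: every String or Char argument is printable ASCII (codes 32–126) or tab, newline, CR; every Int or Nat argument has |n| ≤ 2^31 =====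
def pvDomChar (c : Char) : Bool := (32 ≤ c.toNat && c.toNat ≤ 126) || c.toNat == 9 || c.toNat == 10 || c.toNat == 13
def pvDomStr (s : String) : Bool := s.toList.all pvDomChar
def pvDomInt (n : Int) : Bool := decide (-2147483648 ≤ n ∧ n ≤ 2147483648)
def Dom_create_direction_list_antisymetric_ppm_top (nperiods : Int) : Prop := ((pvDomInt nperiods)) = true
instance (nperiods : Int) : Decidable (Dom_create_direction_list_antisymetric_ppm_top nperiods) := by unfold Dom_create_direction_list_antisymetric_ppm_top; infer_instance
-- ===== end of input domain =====

-- B generates each element directly from its index (lookup on i mod 4 over the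
-- computed total count) instead of A's loop of four appends per period plus a
-- trailing append: an alternative decomposition of equal cost.

-- ===== PORT A =====
def create_direction_list_antisymetric_ppm_top (nperiods : Int) : List (Int × Int × Int) :=
  let direction :=
    (PySem.List.pyRange 0 (4 * nperiods + 5 - 1) 4).foldl
      (fun d _ => ((d ++ [(-1, 1, -1)]) ++ [(1, 1, 1)] ++ [(1, 1, 1)]) ++ [(-1, -1, 1)]) []
  direction ++ [(-1, 1, -1)]

-- ===== PORT B =====
-- pattern[i % 4] of Source B: a positional lookup in the four-element table
def pvPattern : List (Int × Int × Int) := [(-1, 1, -1), (1, 1, 1), (1, 1, 1), (-1, -1, 1)]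

def create_direction_list_antisymetric_ppm_top_alt (nperiods : Int) : List (Int × Int × Int) :=
  let count : Int := 4 * max (nperiods + 1) 0 + 1
  (List.range count.toNat).map (fun i => pvPattern.getD (i % 4) (0, 0, 0))

-- ===== PRECONDITION & SPEC =====
def Spec_create_direction_list_antisymetric_ppm_top (nperiods : Int) (out : List (Int × Int × Int)) : Prop := out = create_direction_list_antisymetric_ppm_top_alt nperiods
instance (nperiods : Int) (out : List (Int × Int × Int)) : Decidable (Spec_create_direction_list_antisymetric_ppm_top nperiods out) := by unfold Spec_create_direction_list_antisymetric_ppm_top; infer_instance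

-- ===== CLAIM (what is proved, stated in full; the proofs are below) =====
def Claim_equal_create_direction_list_antisymetric_ppm_top : Prop := ∀ (nperiods : Int), Dom_create_direction_list_antisymetric_ppm_top nperiods → Spec_create_direction_list_antisymetric_ppm_top nperiods (create_direction_list_antisymetric_ppm_top nperiods)

-- ===== LEMMAS AND PROOFS =====

-- folding the constant four-append over any list of length m prepends m copies of the block
theorem pv_foldl_const_block (l : List Int) (init : List (Int × Int × Int)) :
    l.foldl (fun d _ => ((d ++ [(-1, 1, -1)]) ++ [(1, 1, 1)] ++ [(1, 1, 1)]) ++ [(-1, -1, 1)]) init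
      = init ++ (List.replicate l.length pvPattern).flatten := by
  induction l generalizing init with
  | nil => simp
  | cons x xs ih =>
      simp only [List.foldl_cons, ih, List.length_cons, List.replicate_succ, List.flatten_cons]
      simp [pvPattern]

theorem pv_range_len (n : Int) :
    (PySem.List.pyRange 0 (4 * n + 5 - 1) 4).length = (n + 1).toNat := by
  rw [PySem.List.pyRange_of_pos _ _ (by norm_num : (0:Int) < 4)]
  simp only [List.length_map, List.length_range]
  split_ifs with h
  · omega
  · omega

-- the index-generated list over 4*m+1 indices equals m blocks plus the trailing element
theorem pv_index_form (m : Nat) :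
    (List.range (4 * m + 1)).map (fun i => pvPattern.getD (i % 4) (0, 0, 0))
      = (List.replicate m pvPattern).flatten ++ [(-1, 1, -1)] := by
  induction m with
  | zero => decide
  | succ k ih =>
      have h : 4 * (k + 1) + 1 = (4 * k + 1) + 4 := by omega
      rw [h, List.range_add, List.map_append, ih, List.replicate_succ',
        List.flatten_append]
      have h1 : (4 * k + 1 + 0) % 4 = 1 := by omega
      have h2 : (4 * k + 1 + 1) % 4 = 2 := by omega
      have h3 : (4 * k + 1 + 2) % 4 = 3 := by omega
      have h4 : (4 * k + 1 + 3) % 4 = 0 := by omega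
      simp [List.range_succ, h1, h2, h3, h4, pvPattern]

-- ===== VERDICT (by name: the statement is the Claim_ definition above) =====
theorem create_direction_list_antisymetric_ppm_top_spec : Claim_equal_create_direction_list_antisymetric_ppm_top := by
  intro n _
  unfold Spec_create_direction_list_antisymetric_ppm_top
  unfold create_direction_list_antisymetric_ppm_top create_direction_list_antisymetric_ppm_top_alt
  simp only [pv_foldl_const_block, pv_range_len, List.nil_append]
  have hc : (4 * max (n + 1) 0 + 1).toNat = 4 * (n + 1).toNat + 1 := by omega
  rw [hc, pv_index_form]
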